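-- pv_equiv track=rewrite | github.com/sokolkai/odds-collector | collector.py | _nm_singles_match
-- ===== SOURCE A (Python) =====
-- def _nm_singles_match(a: str, b: str) -> bool:
--     if a == b: return True
--     a_last = a.split()[-1]; b_last = b.split()[-1]
--     if a_last == b_last and len(a) != len(b) and len(a_last) >= 3: return True
--     la, lb = len(a), len(b); diff = abs(la - lb)
--     if diff <= 2 and min(la, lb) >= 7:
--         short = a if la <= lb else b; long_ = b if la <= lb else a
--         if long_.startswith(short): return True
--     if diff == 1 and min(la, lb) >= 4:
--         short, long_ = (a, b) if la < lb else (b, a)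
--         if not long_.startswith(short):
--             for i in range(len(long_)):
--                 if long_[:i] + long_[i+1:] == short: return True
--     return False
-- ===== SOURCE B (Python) =====
-- def _tail_hit(a: str, b: str) -> bool:
--     t = a.split()[-1]
--     return t == b.split()[-1] and len(a) != len(b) and len(t) >= 3
--
-- def _prefix_hit(a: str, b: str) -> bool:
--     short, long_ = sorted((a, b), key=len)
--     return abs(len(a) - len(b)) <= 2 and min(len(a), len(b)) >= 7 and long_.startswith(short)
--
-- def _deletion_hit(a: str, b: str) -> bool:
--     if abs(len(a) - len(b)) != 1 or min(len(a), len(b)) < 4: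
--         return False
--     short, long_ = sorted((a, b), key=len)
--     if long_.startswith(short):
--         return False
--     # two-pointer single-deletion check: first mismatch, then one suffix comparison
--     i = 0
--     while i < len(short) and short[i] == long_[i]:
--         i += 1
--     return long_[i+1:] == short[i:]
--
-- def _nm_singles_match(a: str, b: str) -> bool:
--     return a == b or _tail_hit(a, b) or _prefix_hit(a, b) or _deletion_hit(a, b)
-- ===== Notes on version B (the rewrite author's own statement) =====
-- stated objective: alternative
-- what changed: B is a flat disjunction of three independent helper predicates instead of A's nested early-return chain, and the final one-deletion test, which rebuilt long_[:i]+long_[i+1:] for every candidate i, is replaced by a two-pointer pass that finds the first mismatch and compares the remaining suffixes once.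
import Mathlib
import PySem

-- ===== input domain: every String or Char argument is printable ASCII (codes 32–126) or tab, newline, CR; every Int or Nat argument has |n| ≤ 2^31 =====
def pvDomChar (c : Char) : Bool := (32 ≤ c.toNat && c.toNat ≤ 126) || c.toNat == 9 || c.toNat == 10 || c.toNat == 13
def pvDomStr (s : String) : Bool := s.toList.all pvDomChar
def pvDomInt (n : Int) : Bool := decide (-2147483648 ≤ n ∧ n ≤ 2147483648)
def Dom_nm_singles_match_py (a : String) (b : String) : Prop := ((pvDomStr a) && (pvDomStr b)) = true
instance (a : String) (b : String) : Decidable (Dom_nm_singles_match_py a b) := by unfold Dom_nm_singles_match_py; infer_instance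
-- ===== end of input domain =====

-- B is a flat disjunction of independent helper predicates (vs A's nested early-return chain) and replaces
-- A's slice-rebuilding one-deletion loop by a two-pointer first-mismatch-then-suffix check.

-- ===== PORT A =====
-- A's final loop: for i in range(len(long_)): if long_[:i] + long_[i+1:] == short: return True
def delLoopA (short long_ : List Char) : Bool :=
  (PySem.List.pyRange 0 (PySem.List.len long_) 1).any
    (fun i => PySem.List.slice long_ none (some i) ++ PySem.List.slice long_ (some (i + 1)) none == short)

def nm_singles_match_py (a : String) (b : String) : Bool :=
  if a == b then true
  else
    let a_last := PySem.List.pyGetD (PySem.Str.split₀ a) (-1) ""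
    let b_last := PySem.List.pyGetD (PySem.Str.split₀ b) (-1) ""
    if a_last == b_last ∧ PySem.Str.len a ≠ PySem.Str.len b ∧ PySem.Str.len a_last ≥ 3 then true
    else
      let la := PySem.Str.len a
      let lb := PySem.Str.len b
      let diff := |la - lb|
      if (diff ≤ 2 ∧ min la lb ≥ 7) ∧ PySem.Str.startswith (if la ≤ lb then b else a) (if la ≤ lb then a else b) then true
      else if (diff = 1 ∧ min la lb ≥ 4) ∧ ¬ PySem.Str.startswith (if la < lb then b else a) (if la < lb then a else b) then
        delLoopA (if la < lb then a.toList else b.toList) (if la < lb then b.toList else a.toList)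
      else false

-- ===== PORT B =====
-- helper _tail_hit: shared last whitespace-word of length ≥ 3 with different total lengths
def tailHit (a b : String) : Bool :=
  let t := PySem.List.pyGetD (PySem.Str.split₀ a) (-1) ""
  (t == PySem.List.pyGetD (PySem.Str.split₀ b) (-1) "")
    && decide (PySem.Str.len a ≠ PySem.Str.len b) && decide (PySem.Str.len t ≥ 3)

-- helper _prefix_hit: short, long_ = sorted((a,b), key=len)  (stable: ties keep (a,b) order)
def prefixHit (a b : String) : Bool :=
  let short := if PySem.Str.len a ≤ PySem.Str.len b then a else b
  let long_ := if PySem.Str.len a ≤ PySem.Str.len b then b else a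
  decide (|PySem.Str.len a - PySem.Str.len b| ≤ 2 ∧ min (PySem.Str.len a) (PySem.Str.len b) ≥ 7)
    && PySem.Str.startswith long_ short

-- two-pointer core of _deletion_hit: the while loop advancing i over matching chars is the
-- structural recursion on the two lists; then one suffix comparison long_[i+1:] == short[i:]
def twoPtrDel : List Char → List Char → Bool
  | [], l => l.drop 1 == ([] : List Char)
  | sc :: st, lc :: lt => if sc == lc then twoPtrDel st lt else lt == sc :: st
  | _ :: _, [] => false

-- helper _deletion_hit
def deletionHit (a b : String) : Bool :=
  if |PySem.Str.len a - PySem.Str.len b| = 1 ∧ min (PySem.Str.len a) (PySem.Str.len b) ≥ 4 then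
    let short := if PySem.Str.len a ≤ PySem.Str.len b then a else b
    let long_ := if PySem.Str.len a ≤ PySem.Str.len b then b else a
    if PySem.Str.startswith long_ short then false
    else twoPtrDel short.toList long_.toList
  else false

def nm_singles_match_py_alt (a : String) (b : String) : Bool :=
  (a == b) || tailHit a b || prefixHit a b || deletionHit a b

-- ===== PRECONDITION & SPEC =====
-- Pre_ excludes only inputs on which A RAISES: when a ≠ b and a or b has no whitespace-separated word,
-- a.split()[-1] / b.split()[-1] is an IndexError.
def Pre_nm_singles_match_py (a : String) (b : String) : Prop :=
  a = b ∨ (PySem.Str.split₀ a ≠ [] ∧ PySem.Str.split₀ b ≠ [])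
instance (a : String) (b : String) : Decidable (Pre_nm_singles_match_py a b) := by
  unfold Pre_nm_singles_match_py; infer_instance

def pvWitness_nm_singles_match_py : String × String := ("smith j", "smith jo")

def Spec_nm_singles_match_py (a : String) (b : String) (out : Bool) : Prop := out = nm_singles_match_py_alt a b
instance (a : String) (b : String) (out : Bool) : Decidable (Spec_nm_singles_match_py a b out) := by unfold Spec_nm_singles_match_py; infer_instance

-- ===== CLAIM (what is proved, stated in full; the proofs are below) =====
def Claim_equal_nm_singles_match_py : Prop := ∀ (a : String) (b : String), Dom_nm_singles_match_py a b → Pre_nm_singles_match_py a b → Spec_nm_singles_match_py a b (nm_singles_match_py a b)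

-- ===== LEMMAS AND PROOFS =====

theorem delLoopA_eq_range (s l : List Char) :
    delLoopA s l = (List.range l.length).any (fun i => (l.take i ++ l.drop (i + 1)) == s) := by
  unfold delLoopA
  rw [PySem.List.len_eq, PySem.List.pyRange_zero_natCast, List.any_map]
  refine List.any_congr rfl (fun i => ?_)
  simp only [Function.comp]
  rw [PySem.List.slice_to_natCast]
  have h1 : ((i : Int) + 1) = ((i + 1 : Nat) : Int) := by push_cast; ring
  rw [h1, PySem.List.slice_from_natCast]

theorem loop_eq_twoPtr : ∀ (s l : List Char), l.length = s.length + 1 →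
    (List.range l.length).any (fun i => (l.take i ++ l.drop (i + 1)) == s) = twoPtrDel s l := by
  intro s
  induction s with
  | nil =>
    intro l hl
    match l, hl with
    | [x], _ => rfl
  | cons sc st ih =>
    intro l hl
    match l, hl with
    | lc :: lt, hl2 =>
      have hlt : lt.length = st.length + 1 := by simpa using hl2
      have hsplit : (List.range (lc :: lt).length).any
            (fun i => ((lc :: lt).take i ++ (lc :: lt).drop (i + 1)) == sc :: st)
          = ((lt == sc :: st) ||
             (List.range lt.length).any (fun i => (sc == lc) && ((lt.take i ++ lt.drop (i + 1)) == st))) := by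
        simp only [List.length_cons, List.range_succ_eq_map, List.any_cons, List.any_map]
        refine congrArg₂ (· || ·) rfl ?_
        refine List.any_congr rfl (fun i => ?_)
        show (((lc :: lt).take (i + 1) ++ (lc :: lt).drop (i + 1 + 1)) == sc :: st)
           = ((sc == lc) && ((lt.take i ++ lt.drop (i + 1)) == st))
        simp only [List.take_succ_cons, List.drop_succ_cons, List.cons_append]
        show ((lc == sc) && ((lt.take i ++ lt.drop (i + 1)) == st))
           = ((sc == lc) && ((lt.take i ++ lt.drop (i + 1)) == st))
        rw [BEq.comm]
      rw [hsplit]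
      by_cases hsc : sc = lc
      · subst hsc
        simp only [BEq.rfl, Bool.true_and]
        rw [ih lt hlt]
        show ((lt == sc :: st) || twoPtrDel st lt) = twoPtrDel (sc :: st) (sc :: lt)
        by_cases hlt2 : lt = sc :: st
        · subst hlt2
          have hone : twoPtrDel st (sc :: st) = true := by
            rw [← ih (sc :: st) (by simp)]
            exact List.any_eq_true.mpr ⟨0, by simp, by simp⟩
          simp [twoPtrDel, hone]
        · have hne : ((lt == sc :: st) : Bool) = false := beq_eq_false_iff_ne.mpr hlt2
          rw [hne]
          simp [twoPtrDel]
      · have hscb : ((sc == lc) : Bool) = false := beq_eq_false_iff_ne.mpr hsc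
        have hlcb : ((lc == sc) : Bool) = false := beq_eq_false_iff_ne.mpr (Ne.symm hsc)
        simp only [hscb, Bool.false_and]
        rw [show ((List.range lt.length).any fun _ => false) = false by simp]
        simp [twoPtrDel, hsc]

theorem delLoopA_eq_twoPtrDel (s l : List Char) (h : l.length = s.length + 1) :
    delLoopA s l = twoPtrDel s l := by
  rw [delLoopA_eq_range, loop_eq_twoPtr s l h]

theorem main_eq (a b : String) : nm_singles_match_py a b = nm_singles_match_py_alt a b := by
  simp only [nm_singles_match_py, nm_singles_match_py_alt, tailHit, prefixHit, deletionHit]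
  by_cases hab : (a == b) = true
  · simp [hab]
  · have habf : (a == b) = false := by revert hab; cases a == b <;> simp
    rw [if_neg hab, habf, Bool.false_or]
    by_cases h2 : (PySem.List.pyGetD (PySem.Str.split₀ a) (-1) ""
          == PySem.List.pyGetD (PySem.Str.split₀ b) (-1) "") = true ∧
        PySem.Str.len a ≠ PySem.Str.len b ∧
        PySem.Str.len (PySem.List.pyGetD (PySem.Str.split₀ a) (-1) "") ≥ 3
    · rw [if_pos h2]
      have hT : (PySem.List.pyGetD (PySem.Str.split₀ a) (-1) ""
            == PySem.List.pyGetD (PySem.Str.split₀ b) (-1) ""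
          && decide (PySem.Str.len a ≠ PySem.Str.len b)
          && decide (PySem.Str.len (PySem.List.pyGetD (PySem.Str.split₀ a) (-1) "") ≥ 3)) = true := by
        simp only [Bool.and_eq_true, decide_eq_true_eq]
        exact ⟨⟨h2.1, h2.2.1⟩, h2.2.2⟩
      rw [hT]; simp
    · rw [if_neg h2]
      have hTf : (PySem.List.pyGetD (PySem.Str.split₀ a) (-1) ""
            == PySem.List.pyGetD (PySem.Str.split₀ b) (-1) ""
          && decide (PySem.Str.len a ≠ PySem.Str.len b)
          && decide (PySem.Str.len (PySem.List.pyGetD (PySem.Str.split₀ a) (-1) "") ≥ 3)) = false := by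
        by_contra hc
        have hT := (Bool.not_eq_false _).mp hc
        simp only [Bool.and_eq_true, decide_eq_true_eq] at hT
        exact h2 ⟨hT.1.1, hT.1.2, hT.2⟩
      rw [hTf, Bool.false_or]
      by_cases h3 : (|PySem.Str.len a - PySem.Str.len b| ≤ 2 ∧
            min (PySem.Str.len a) (PySem.Str.len b) ≥ 7) ∧
          PySem.Str.startswith (if PySem.Str.len a ≤ PySem.Str.len b then b else a)
            (if PySem.Str.len a ≤ PySem.Str.len b then a else b) = true
      · rw [if_pos h3]
        have hP : (decide (|PySem.Str.len a - PySem.Str.len b| ≤ 2 ∧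
              min (PySem.Str.len a) (PySem.Str.len b) ≥ 7)
            && PySem.Str.startswith (if PySem.Str.len a ≤ PySem.Str.len b then b else a)
              (if PySem.Str.len a ≤ PySem.Str.len b then a else b)) = true := by
          rw [h3.2, decide_eq_true h3.1, Bool.and_true]
        rw [hP]; simp
      · rw [if_neg h3]
        have hPf : (decide (|PySem.Str.len a - PySem.Str.len b| ≤ 2 ∧
              min (PySem.Str.len a) (PySem.Str.len b) ≥ 7)
            && PySem.Str.startswith (if PySem.Str.len a ≤ PySem.Str.len b then b else a)
              (if PySem.Str.len a ≤ PySem.Str.len b then a else b)) = false := by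
          by_contra hc
          have hP := (Bool.not_eq_false _).mp hc
          simp only [Bool.and_eq_true, decide_eq_true_eq] at hP
          exact h3 ⟨hP.1, hP.2⟩
        rw [hPf, Bool.false_or]
        by_cases h4 : (|PySem.Str.len a - PySem.Str.len b| = 1 ∧
              min (PySem.Str.len a) (PySem.Str.len b) ≥ 4) ∧
            ¬ PySem.Str.startswith (if PySem.Str.len a < PySem.Str.len b then b else a)
              (if PySem.Str.len a < PySem.Str.len b then a else b) = true
        · rw [if_pos h4, if_pos h4.1]
          have hne : PySem.Str.len a ≠ PySem.Str.len b := by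
            have h1 := h4.1.1
            intro h; rw [h] at h1; simp at h1
          have hlea := PySem.Str.len_eq a
          have hleb := PySem.Str.len_eq b
          by_cases hlt : PySem.Str.len a < PySem.Str.len b
          · have hle : PySem.Str.len a ≤ PySem.Str.len b := le_of_lt hlt
            rw [if_pos hlt, if_pos hlt] at h4 ⊢
            rw [if_pos hle, if_pos hle]
            have hswf : PySem.Str.startswith b a = false := by
              revert h4; cases PySem.Str.startswith b a <;> simp
            rw [if_neg (by rw [hswf]; simp)]
            refine delLoopA_eq_twoPtrDel _ _ ?_
            rcases (abs_eq (by norm_num : (0:Int) ≤ 1)).1 h4.1.1 with h | h <;> omega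
          · have hle : ¬ PySem.Str.len a ≤ PySem.Str.len b := by
              intro h; exact hlt (lt_of_le_of_ne h hne)
            rw [if_neg hlt, if_neg hlt] at h4 ⊢
            rw [if_neg hle, if_neg hle]
            have hswf : PySem.Str.startswith a b = false := by
              revert h4; cases PySem.Str.startswith a b <;> simp
            rw [if_neg (by rw [hswf]; simp)]
            refine delLoopA_eq_twoPtrDel _ _ ?_
            rcases (abs_eq (by norm_num : (0:Int) ≤ 1)).1 h4.1.1 with h | h <;> omega
        · rw [if_neg h4]
          by_cases hc4 : |PySem.Str.len a - PySem.Str.len b| = 1 ∧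
              min (PySem.Str.len a) (PySem.Str.len b) ≥ 4
          · rw [if_pos hc4]
            have hne : PySem.Str.len a ≠ PySem.Str.len b := by
              have h1 := hc4.1
              intro h; rw [h] at h1; simp at h1
            have hsw : PySem.Str.startswith
                (if PySem.Str.len a < PySem.Str.len b then b else a)
                (if PySem.Str.len a < PySem.Str.len b then a else b) = true := by
              by_contra hs
              exact h4 ⟨hc4, hs⟩
            by_cases hlt : PySem.Str.len a < PySem.Str.len b
            · have hle : PySem.Str.len a ≤ PySem.Str.len b := le_of_lt hlt
              rw [if_pos hlt, if_pos hlt] at hsw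
              rw [if_pos hle, if_pos hle, if_pos hsw]
            · have hle : ¬ PySem.Str.len a ≤ PySem.Str.len b := by
                intro h; exact hlt (lt_of_le_of_ne h hne)
              rw [if_neg hlt, if_neg hlt] at hsw
              rw [if_neg hle, if_neg hle, if_pos hsw]
          · rw [if_neg hc4]

-- ===== VERDICT (by name: the statement is the Claim_ definition above) =====
theorem nm_singles_match_py_spec : Claim_equal_nm_singles_match_py := by
  intro a b _ _
  exact main_eq a b
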